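-- pv_equiv track=rewrite | github.com/WhizHack-Tech/package_building_testing | frontend/grouping_epoch_time.py | group_time_by_minute
-- ===== SOURCE A (Python) =====
-- def group_time_by_minute(start_time, end_time):
--
--     # Calculate the total number of minutes
--     total_minutes = (end_time - start_time) // (60 * 1000)
--
--     # Initialize the result list
--     result = []
--
--     # Generate start and end times for each minute
--     for i in range(total_minutes):
--         minute_start = start_time + (i * 60 * 1000)
--         minute_end = minute_start + (60 * 1000)
--         result.append((minute_start, minute_end))
--
--     return result
-- ===== SOURCE B (Python) =====
-- def group_time_by_minute(start_time, end_time):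
--     # Walk a time cursor backwards from the last minute boundary, collecting
--     # intervals top-down, then reverse once at the end.
--     result = []
--     t = end_time - (end_time - start_time) % (60 * 1000)
--     while t - 60 * 1000 >= start_time:
--         result.append((t - 60 * 1000, t))
--         t -= 60 * 1000
--     result.reverse()
--     return result
-- ===== Notes on version B (the rewrite author's own statement) =====
-- stated objective: alternative
-- what changed: B replaces the counted index loop (total_minutes computed by floor division, endpoints computed from the index) by a backwards cursor walk: it computes the last minute boundary with a modulo, steps the cursor down by one minute while it stays above start_time, collecting intervals top-down, and reverses the list once at the end.
import Mathlib
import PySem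

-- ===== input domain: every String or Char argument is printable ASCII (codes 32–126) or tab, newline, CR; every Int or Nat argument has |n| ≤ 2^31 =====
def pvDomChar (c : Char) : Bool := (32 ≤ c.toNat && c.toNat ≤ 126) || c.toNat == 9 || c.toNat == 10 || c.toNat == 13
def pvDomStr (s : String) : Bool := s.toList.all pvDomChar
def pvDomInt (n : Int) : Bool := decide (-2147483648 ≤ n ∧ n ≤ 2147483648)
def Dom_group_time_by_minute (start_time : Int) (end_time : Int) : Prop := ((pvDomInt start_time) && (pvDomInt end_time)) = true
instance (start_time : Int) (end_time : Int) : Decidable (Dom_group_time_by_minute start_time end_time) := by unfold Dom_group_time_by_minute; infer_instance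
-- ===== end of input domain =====

-- B walks a time cursor backwards from the last minute boundary (found with a modulo),
-- collecting intervals top-down, and reverses once at the end, instead of A's counted
-- index loop (objective: alternative; same cost).

-- ===== PORT A =====
def group_time_by_minute (start_time : Int) (end_time : Int) : List (Int × Int) :=
  let total_minutes := PySem.Int.floordiv (end_time - start_time) (60 * 1000)
  (PySem.List.pyRange 0 total_minutes 1).foldl
    (fun result i =>
      let minute_start := start_time + i * 60 * 1000
      let minute_end := minute_start + 60 * 1000
      result ++ [(minute_start, minute_end)]) []

-- ===== PORT B =====
-- the 'while t - 60*1000 >= start_time' loop of Source B, state = (t, result)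
def pvGoB (start_time : Int) (t : Int) (result : List (Int × Int)) : List (Int × Int) :=
  if t - 60 * 1000 ≥ start_time then
    pvGoB start_time (t - 60 * 1000) (result ++ [(t - 60 * 1000, t)])
  else result
termination_by (t - start_time).toNat
decreasing_by omega

def group_time_by_minute_alt (start_time : Int) (end_time : Int) : List (Int × Int) :=
  let t := end_time - PySem.Int.mod (end_time - start_time) (60 * 1000)
  (pvGoB start_time t []).reverse

-- ===== PRECONDITION & SPEC =====
def Spec_group_time_by_minute (start_time : Int) (end_time : Int) (out : List (Int × Int)) : Prop := out = group_time_by_minute_alt start_time end_time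
instance (start_time : Int) (end_time : Int) (out : List (Int × Int)) : Decidable (Spec_group_time_by_minute start_time end_time out) := by unfold Spec_group_time_by_minute; infer_instance

-- ===== CLAIM (what is proved, stated in full; the proofs are below) =====
def Claim_equal_group_time_by_minute : Prop := ∀ (start_time : Int) (end_time : Int), Dom_group_time_by_minute start_time end_time → Spec_group_time_by_minute start_time end_time (group_time_by_minute start_time end_time)

-- ===== LEMMAS AND PROOFS =====

-- B's loop, started at the n-th boundary, appends the n intervals top-down
theorem pvGoB_spec (s : Int) (n : Nat) (acc : List (Int × Int)) :
    pvGoB s (s + (n : Int) * 60000) acc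
      = acc ++ ((List.range n).map
          (fun k : Nat => (s + (k : Int) * 60000, s + (k : Int) * 60000 + 60000))).reverse := by
  induction n generalizing acc with
  | zero => rw [pvGoB]; simp
  | succ m ih =>
      rw [pvGoB,
        if_pos (show s + ((m + 1 : Nat) : Int) * 60000 - 60 * 1000 ≥ s by
          push_cast; nlinarith [Int.natCast_nonneg m])]
      have h1 : s + ((m + 1 : Nat) : Int) * 60000 - 60 * 1000 = s + (m : Int) * 60000 := by
        push_cast; ring
      rw [h1, ih]
      simp [List.range_succ]
      ring

theorem group_time_by_minute_eq (s e : Int) :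
    group_time_by_minute s e = group_time_by_minute_alt s e := by
  unfold group_time_by_minute group_time_by_minute_alt
  dsimp only
  have hdm := PySem.Int.floordiv_mul_add_mod (e - s) (60 * 1000)
  set q := PySem.Int.floordiv (e - s) (60 * 1000) with hq
  have ht : e - PySem.Int.mod (e - s) (60 * 1000) = s + q * 60000 := by omega
  rw [ht]
  rcases le_or_gt 0 q with hpos | hneg
  · obtain ⟨n, hn⟩ : ∃ n : Nat, q = (n : Int) := ⟨q.toNat, (Int.toNat_of_nonneg hpos).symm⟩
    rw [hn, PySem.List.pyRange_zero_natCast, PySem.List.foldl_append_singleton_eq_map,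
        pvGoB_spec]
    simp [List.map_map, Function.comp_def]
    intro k _
    ring
  · -- q < 0 : both sides empty
    have hA : PySem.List.pyRange 0 q 1 = [] := by
      simp [PySem.List.pyRange]; omega
    have hB : pvGoB s (s + q * 60000) [] = [] := by
      rw [pvGoB, if_neg]
      nlinarith
    simp [hA, hB]

-- ===== VERDICT (by name: the statement is the Claim_ definition above) =====
theorem group_time_by_minute_spec : Claim_equal_group_time_by_minute := by
  intro s e _
  exact group_time_by_minute_eq s e
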